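-- pv_equiv track=rewrite | github.com/ksh103/Algorithm-Study-Reboot | 230119/장예찬_boj_1501_영어 읽기.py | solution
-- ===== SOURCE A (Python) =====
-- from collections import Counter
--
-- def solution(N, voca, M, sentences):
--     k = Counter([((v[0], v[-1]), tuple(sorted(Counter(v).most_common()))) for v in voca])
--     answer = []
--     for string in sentences:
--         partAnswer = 1
--         for s in string.split():
--             sTuple = tuple(sorted(Counter(s).most_common()))
--             key = ((s[0], s[-1]), sTuple)
--             partAnswer *= k.get(key, 0)
--         answer.append(partAnswer)
--     return answer
-- ===== SOURCE B (Python) =====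
-- def solution(N, voca, M, sentences):
--     answer = []
--     for string in sentences:
--         part = 1
--         for s in string.split():
--             cnt = 0
--             for v in voca:
--                 if v[0] == s[0] and v[-1] == s[-1] and sorted(v) == sorted(s):
--                     cnt += 1
--             part *= cnt
--         answer.append(part)
--     return answer
-- ===== Notes on version B (the rewrite author's own statement) =====
-- stated objective: simpler
-- what changed: B drops A's precomputed Counter index keyed by (first,last,sorted-letter-multiset) and instead, for each sentence word, rescans the whole vocabulary counting words with matching first letter, last letter and sorted letters, multiplying the counts.
import Mathlib
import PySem

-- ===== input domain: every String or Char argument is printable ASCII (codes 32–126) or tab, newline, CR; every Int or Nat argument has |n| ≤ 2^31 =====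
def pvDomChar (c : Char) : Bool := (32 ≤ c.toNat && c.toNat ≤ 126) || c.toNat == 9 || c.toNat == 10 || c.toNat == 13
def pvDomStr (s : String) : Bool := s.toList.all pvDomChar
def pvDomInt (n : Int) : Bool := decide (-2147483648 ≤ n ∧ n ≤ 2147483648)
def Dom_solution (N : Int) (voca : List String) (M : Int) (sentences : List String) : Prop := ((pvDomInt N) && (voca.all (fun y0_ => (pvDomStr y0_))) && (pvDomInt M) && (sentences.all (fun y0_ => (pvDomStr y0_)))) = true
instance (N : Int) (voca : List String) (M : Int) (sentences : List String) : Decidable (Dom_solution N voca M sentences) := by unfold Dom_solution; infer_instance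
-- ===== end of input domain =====

-- B drops A's prebuilt Counter index and instead rescans the whole vocabulary for each sentence
-- word (matching first letter, last letter and sorted letters); simpler, not faster.
-- ===== PORT A =====
-- A's key ((v[0], v[-1]), tuple(sorted(Counter(v).most_common()))): most_common() reorders the
-- Counter's items and sorted() then sorts those (char,count) pairs lexicographically; since the
-- chars (keys) are pairwise distinct, the sorted result is exactly the Counter's items sorted by
-- the (fst, snd) tuple key — sorted2 of the items; exact for this code. v[0]/v[-1] are pyGetD
-- with an arbitrary default (' '): Pre_ excludes the empty strings on which Python raises.
def keyA (v : List Char) : (Char × Char) × List (Char × Int) :=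
  ((PySem.List.pyGetD v 0 ' ', PySem.List.pyGetD v (-1) ' '),
   PySem.List.sorted2 (PySem.Dict.counter v).items Prod.fst Prod.snd)

def solution (N : Int) (voca : List String) (M : Int) (sentences : List String) : List Int :=
  let k := PySem.Dict.counter (voca.map (fun v => keyA v.toList))
  sentences.foldl (fun answer string =>
    answer ++ [(PySem.Str.split₀ string).foldl
      (fun partAnswer s => partAnswer * k.getD (keyA s.toList) 0) 1]) []

-- ===== PORT B =====
-- 'if v[0] == s[0] and v[-1] == s[-1] and sorted(v) == sorted(s)' — v[0]/v[-1] as pyGetD with an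
-- arbitrary default (' '), exact on Pre_ (no empty string in voca; split words are nonempty).
def matchB (s v : List Char) : Bool :=
  (PySem.List.pyGetD v 0 ' ' == PySem.List.pyGetD s 0 ' ')
    && (PySem.List.pyGetD v (-1) ' ' == PySem.List.pyGetD s (-1) ' ')
    && (PySem.List.sorted v (fun x => x) == PySem.List.sorted s (fun x => x))

def solution_alt (N : Int) (voca : List String) (M : Int) (sentences : List String) : List Int :=
  sentences.foldl (fun answer string =>
    answer ++ [(PySem.Str.split₀ string).foldl
      (fun part s => part *
        voca.foldl (fun cnt v => if matchB s.toList v.toList then cnt + 1 else cnt) (0 : Int)) 1]) []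

-- ===== PRECONDITION & SPEC =====
-- Pre_ excludes only the inputs on which A raises: an empty string in voca makes v[0] an IndexError.
def Pre_solution (N : Int) (voca : List String) (M : Int) (sentences : List String) : Prop :=
  "" ∉ voca
instance (N : Int) (voca : List String) (M : Int) (sentences : List String) : Decidable (Pre_solution N voca M sentences) := by unfold Pre_solution; infer_instance
def pvWitness_solution : Int × List String × Int × List String := (2, ["ab", "ba", "ab"], 1, ["ab ba", "zz"])

def Spec_solution (N : Int) (voca : List String) (M : Int) (sentences : List String) (out : List Int) : Prop := out = solution_alt N voca M sentences
instance (N : Int) (voca : List String) (M : Int) (sentences : List String) (out : List Int) : Decidable (Spec_solution N voca M sentences out) := by unfold Spec_solution; infer_instance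

-- ===== CLAIM (what is proved, stated in full; the proofs are below) =====
def Claim_equal_solution : Prop := ∀ (N : Int) (voca : List String) (M : Int) (sentences : List String), Dom_solution N voca M sentences → Pre_solution N voca M sentences → Spec_solution N voca M sentences (solution N voca M sentences)

-- ===== LEMMAS AND PROOFS =====

theorem insertByPerm {α : Type} (before : α → α → Bool) (x : α) (ys : List α) :
    (PySem.List.insertBy before x ys).Perm (x :: ys) := by
  induction ys with
  | nil => simp [PySem.List.insertBy]
  | cons y ys ih =>
    simp only [PySem.List.insertBy]
    split
    · exact List.Perm.refl _
    · exact (ih.cons y).trans (List.Perm.swap x y ys)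

theorem insertByCongr {α : Type} (f g : α → α → Bool) (x : α) (ys : List α)
    (h : ∀ b ∈ ys, f x b = g x b) :
    PySem.List.insertBy f x ys = PySem.List.insertBy g x ys := by
  induction ys with
  | nil => rfl
  | cons y ys ih =>
    simp only [PySem.List.insertBy]
    rw [h y (by simp), ih (fun b hb => h b (by simp [hb]))]

theorem foldlInsertByCongr {α : Type} (f g : α → α → Bool) :
    ∀ (l acc : List α), (l ++ acc).Nodup →
      (∀ a ∈ l, ∀ b, (b ∈ l ∨ b ∈ acc) → a ≠ b → f a b = g a b) →
      l.foldl (fun acc x => PySem.List.insertBy f x acc) acc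
        = l.foldl (fun acc x => PySem.List.insertBy g x acc) acc := by
  intro l
  induction l with
  | nil => intro acc _ _; rfl
  | cons x t ih =>
    intro acc hnd h
    have hxacc : x ∉ acc := by
      intro hx
      exact (List.disjoint_of_nodup_append hnd) (by simp) hx
    have hstep : PySem.List.insertBy f x acc = PySem.List.insertBy g x acc := by
      refine insertByCongr f g x acc (fun b hb => ?_)
      exact h x (by simp) b (Or.inr hb) (fun he => hxacc (he ▸ hb))
    have hperm : (t ++ PySem.List.insertBy g x acc).Perm (x :: (t ++ acc)) :=
      (List.Perm.append_left t (insertByPerm g x acc)).trans List.perm_middle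
    have hnd' : (t ++ PySem.List.insertBy g x acc).Nodup := by
      refine hperm.nodup_iff.2 ?_
      simpa using hnd
    simp only [List.foldl_cons]
    rw [hstep]
    refine ih (PySem.List.insertBy g x acc) hnd' ?_
    intro a ha b hb hab
    refine h a (by simp [ha]) b ?_ hab
    rcases hb with hb | hb
    · exact Or.inl (by simp [hb])
    · rcases (PySem.List.mem_insertBy g x b acc).1 hb with rfl | hb
      · exact Or.inl (by simp)
      · exact Or.inr hb

-- A comparator fact: on pairs with distinct first components the lexicographic (fst, snd)
-- comparison is the fst comparison.
theorem lexEqFst (a b : Char × Int) (h : a.1 ≠ b.1) :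
    (decide (a.1 < b.1) || (!decide (b.1 < a.1) && decide (a.2 < b.2))) = decide (a.1 < b.1) := by
  rcases lt_trichotomy a.1 b.1 with h1 | h1 | h1
  · simp [h1]
  · exact absurd h1 h
  · simp [h1, not_lt_of_gt h1]

theorem sorted2EqSortedFst (xs : List (Char × Int)) (h : (xs.map Prod.fst).Nodup) :
    PySem.List.sorted2 xs Prod.fst Prod.snd = PySem.List.sorted xs Prod.fst := by
  have hnd : xs.Nodup := h.of_map
  have hinj := List.inj_on_of_nodup_map h
  show xs.foldl (fun acc x => PySem.List.insertBy _ x acc) []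
      = xs.foldl (fun acc x => PySem.List.insertBy _ x acc) []
  refine foldlInsertByCongr _ _ xs [] (by simpa using hnd) ?_
  intro a ha b hb hab
  rcases hb with hb | hb
  · exact lexEqFst a b (fun he => hab (hinj ha hb he))
  · simp at hb

theorem itemsFstNodup (v : List Char) :
    (((PySem.Dict.counter v).items).map Prod.fst).Nodup := by
  have := PySem.Dict.nodup_keys_counter (κ := Char) v
  simpa [PySem.Dict.keys] using this

theorem itemsPermOfPerm {v s : List Char} (h : v.Perm s) :
    ((PySem.Dict.counter v).items).Perm ((PySem.Dict.counter s).items) := by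
  rw [PySem.Dict.items_counter, PySem.Dict.items_counter]
  have hset : (PySem.Set.ofList v).Perm (PySem.Set.ofList s) := by
    refine (List.perm_ext_iff_of_nodup (PySem.Set.nodup_ofList v) (PySem.Set.nodup_ofList s)).2 ?_
    intro a
    rw [PySem.Set.mem_ofList, PySem.Set.mem_ofList]
    exact h.mem_iff
  have hmapeq : (PySem.Set.ofList s).map (fun k => (k, (List.count k v : Int)))
      = (PySem.Set.ofList s).map (fun k => (k, (List.count k s : Int))) := by
    refine List.map_congr_left (fun k _ => ?_)
    rw [h.count_eq]
  rw [← hmapeq]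
  exact hset.map _

theorem permOfItemsPerm {v s : List Char}
    (h : ((PySem.Dict.counter v).items).Perm ((PySem.Dict.counter s).items)) : v.Perm s := by
  rw [List.perm_iff_count]
  intro c
  have key : ∀ (x y : List Char), ((PySem.Dict.counter x).items).Perm ((PySem.Dict.counter y).items) →
      c ∈ x → List.count c y = List.count c x := by
    intro x y hp hc
    have hmem : ((c, (List.count c x : Int))) ∈ (PySem.Dict.counter x).items := by
      rw [PySem.Dict.items_counter]
      exact List.mem_map.2 ⟨c, (PySem.Set.mem_ofList x c).2 hc, rfl⟩
    have hmem' := hp.mem_iff.1 hmem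
    rw [PySem.Dict.items_counter] at hmem'
    rcases List.mem_map.1 hmem' with ⟨k, _, hk⟩
    have h1 : k = c := congrArg Prod.fst hk
    have h2 : (List.count k y : Int) = (List.count c x : Int) := congrArg Prod.snd hk
    subst h1
    exact_mod_cast h2
  by_cases hc : c ∈ v
  · exact (key v s h hc).symm
  · by_cases hcs : c ∈ s
    · exact key s v h.symm hcs
    · simp [List.count_eq_zero_of_not_mem hc, List.count_eq_zero_of_not_mem hcs]

theorem citemsEqIff (v s : List Char) :
    PySem.List.sorted2 (PySem.Dict.counter v).items Prod.fst Prod.snd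
      = PySem.List.sorted2 (PySem.Dict.counter s).items Prod.fst Prod.snd ↔ v.Perm s := by
  constructor
  · intro h
    refine permOfItemsPerm ?_
    have h1 := (PySem.List.sorted2_perm (PySem.Dict.counter v).items Prod.fst Prod.snd false).symm
    have h2 := PySem.List.sorted2_perm (PySem.Dict.counter s).items Prod.fst Prod.snd false
    rw [h] at h1
    exact h1.trans h2
  · intro h
    have hip := itemsPermOfPerm h
    rw [sorted2EqSortedFst _ (itemsFstNodup v), sorted2EqSortedFst _ (itemsFstNodup s)]
    refine PySem.List.sorted_eq_of_perm_of_pairwise_lt _ _ _ ?_ ?_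
    · exact (PySem.List.sorted_perm _ _ _).trans hip.symm
    · have hle := PySem.List.sorted_pairwise ((PySem.Dict.counter s).items) Prod.fst
      have hnd : ((PySem.List.sorted ((PySem.Dict.counter s).items) Prod.fst).map Prod.fst).Nodup := by
        exact ((PySem.List.sorted_perm _ _ _).map Prod.fst).nodup_iff.2 (itemsFstNodup s)
      have hne : (PySem.List.sorted ((PySem.Dict.counter s).items) Prod.fst).Pairwise
          (fun a b => a.1 ≠ b.1) := by
        simpa [List.Nodup, List.pairwise_map] using hnd
      exact (hle.and hne).imp (fun h => lt_of_le_of_ne h.1 h.2)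

theorem keyAEqIff (v s : List Char) :
    keyA v = keyA s ↔ matchB s v = true := by
  simp only [keyA, matchB, Prod.mk.injEq, Bool.and_eq_true, beq_iff_eq, citemsEqIff,
    PySem.List.sorted_id_eq_sorted_id_iff_perm]

theorem factorEq (voca : List String) (hpre : "" ∉ voca) (s : String) :
    (PySem.Dict.counter (voca.map (fun v => keyA v.toList))).getD (keyA s.toList) 0
      = voca.foldl (fun cnt v => if matchB s.toList v.toList then cnt + 1 else cnt) (0 : Int) := by
  rw [PySem.Dict.getD_counter, PySem.List.foldl_if_add_one]
  rw [zero_add]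
  congr 1
  rw [List.count_eq_countP, List.countP_map]
  refine List.countP_congr (fun u hu => ?_)
  simp only [Function.comp]
  rw [beq_iff_eq]
  exact keyAEqIff u.toList s.toList

-- ===== VERDICT (by name: the statement is the Claim_ definition above) =====
theorem solution_spec : Claim_equal_solution := by
  intro N voca M sentences _ hpre
  unfold Spec_solution solution solution_alt
  simp only [PySem.List.foldl_append_singleton_eq_map, List.nil_append]
  refine List.map_congr_left (fun string _ => ?_)
  refine PySem.List.foldl_congr_mem _ _ _ _ (fun acc s _ => ?_)
  rw [factorEq voca hpre s]
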